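-- pv_equiv track=rewrite | github.com/Kwakcena/codeplus-SW-competency | 재귀/부분집합의합/baekjoon_1182_test.py | go
-- ===== SOURCE A (Python) =====
-- def go(goal, max_ans_len, nums, max_index_range, index = 0, cnt = 0, ans = 0):
--     if cnt == max_ans_len:
--         if ans == goal:
--             return 1
--         else:
--             return 0
--
--     if index >= max_index_range:
--         return 0
--
--     return go(goal, max_ans_len, nums, max_index_range, index + 1, cnt + 1, ans + nums[index]) + \
--            go(goal, max_ans_len, nums, max_index_range, index + 1, cnt, ans)
-- ===== SOURCE B (Python) =====
-- def go(goal, max_ans_len, nums, max_index_range, index = 0, cnt = 0, ans = 0):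
--     k = max_ans_len - cnt
--     if k == 0:
--         return 1 if ans == goal else 0
--     if k < 0:
--         return 0
--     target = goal - ans
--     # dynamic programming over the positions index .. max_index_range-1:
--     # counts[(c, s)] = number of subsets of the items seen so far with size c (c <= k) and sum s
--     counts = {(0, 0): 1}
--     for i in range(index, max_index_range):
--         x = nums[i]
--         new = dict(counts)
--         for (c, s), m in counts.items():
--             if c < k:
--                 key = (c + 1, s + x)
--                 new[key] = new.get(key, 0) + m
--         counts = new
--     return sum(m for (c, s), m in counts.items() if c == k and s == target)
-- ===== Notes on version B (the rewrite author's own statement) =====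
-- stated objective: alternative
-- what changed: Replaced A's top-down take/skip branch recursion by a single left-to-right dynamic-programming pass that keeps a dictionary counting, for each (subset size, subset sum) state, how many subsets of the items seen so far realise it, and reads off the count for (size k, target sum) at the end.
import Mathlib
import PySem

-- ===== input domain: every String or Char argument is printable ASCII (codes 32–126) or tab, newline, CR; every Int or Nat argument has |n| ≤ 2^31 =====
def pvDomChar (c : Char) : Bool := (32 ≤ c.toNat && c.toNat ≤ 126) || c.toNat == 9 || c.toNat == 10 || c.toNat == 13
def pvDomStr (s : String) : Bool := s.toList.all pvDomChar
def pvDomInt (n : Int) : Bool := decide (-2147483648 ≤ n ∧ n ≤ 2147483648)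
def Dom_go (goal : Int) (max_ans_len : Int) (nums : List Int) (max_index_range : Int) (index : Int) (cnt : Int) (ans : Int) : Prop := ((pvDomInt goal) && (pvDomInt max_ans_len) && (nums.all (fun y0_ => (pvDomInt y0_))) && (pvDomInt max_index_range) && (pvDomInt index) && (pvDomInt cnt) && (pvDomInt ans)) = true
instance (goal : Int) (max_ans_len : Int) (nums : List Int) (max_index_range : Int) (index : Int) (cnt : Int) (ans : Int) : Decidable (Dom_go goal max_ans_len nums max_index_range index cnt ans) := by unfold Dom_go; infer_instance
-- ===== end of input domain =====

-- B replaces A's take/skip branch recursion by a one-pass dynamic programming over (size, sum)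
-- states kept in a dictionary (alternative algorithm; same worst-case cost on distinct values).

-- ===== PORT A =====
def go (goal : Int) (max_ans_len : Int) (nums : List Int) (max_index_range : Int) (index : Int) (cnt : Int) (ans : Int) : Int :=
  if cnt = max_ans_len then (if ans = goal then 1 else 0)
  else if max_index_range ≤ index then 0
  else
    match PySem.List.pyGet? nums index with
    | none => 0  -- IndexError in Python; excluded by Pre_go
    | some x =>
        go goal max_ans_len nums max_index_range (index + 1) (cnt + 1) (ans + x) +
        go goal max_ans_len nums max_index_range (index + 1) cnt ans
termination_by (max_index_range - index).toNat
decreasing_by all_goals omega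

-- ===== PORT B =====
-- body of B's outer 'for i in range(index, max_index_range)' loop: fold the item x into the
-- (size, sum) -> count dictionary ('new = dict(counts); for (c, s), m in counts.items(): …')
def goStep (k x : Int) (d : PySem.Dict (Int × Int) Int) : PySem.Dict (Int × Int) Int :=
  d.items.foldl (fun nd p =>
    if p.1.1 < k then nd.insert (p.1.1 + 1, p.1.2 + x) (nd.getD (p.1.1 + 1, p.1.2 + x) 0 + p.2)
    else nd) d

def go_alt (goal : Int) (max_ans_len : Int) (nums : List Int) (max_index_range : Int) (index : Int) (cnt : Int) (ans : Int) : Int :=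
  let k := max_ans_len - cnt
  if k = 0 then (if ans = goal then 1 else 0)
  else if k < 0 then 0
  else
    let target := goal - ans
    let final := (PySem.List.pyRange index max_index_range).foldl
      (fun d i =>
        match PySem.List.pyGet? nums i with
        | none => d  -- IndexError in Python; excluded by Pre_go
        | some x => goStep k x d)
      ((PySem.Dict.empty).insert ((0 : Int), (0 : Int)) (1 : Int))
    final.items.foldl (fun acc p => if p.1.1 = k ∧ p.1.2 = target then acc + p.2 else acc) 0

-- ===== PRECONDITION & SPEC =====
-- Pre_go: exactly the inputs where A's recursion never evaluates nums[i] at an invalid index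
-- (otherwise Python raises IndexError); it excludes nothing on which A returns.
def Pre_go (goal : Int) (max_ans_len : Int) (nums : List Int) (max_index_range : Int) (index : Int) (cnt : Int) (ans : Int) : Prop :=
  cnt = max_ans_len ∨ max_index_range ≤ index ∨
    (-(nums.length : Int) ≤ index ∧ max_index_range ≤ (nums.length : Int))
instance (goal : Int) (max_ans_len : Int) (nums : List Int) (max_index_range : Int) (index : Int) (cnt : Int) (ans : Int) : Decidable (Pre_go goal max_ans_len nums max_index_range index cnt ans) := by unfold Pre_go; infer_instance
def pvWitness_go : Int × Int × List Int × Int × Int × Int × Int := (0, 2, [1, -1, 2], 3, 0, 0, 0)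

def Spec_go (goal : Int) (max_ans_len : Int) (nums : List Int) (max_index_range : Int) (index : Int) (cnt : Int) (ans : Int) (out : Int) : Prop := out = go_alt goal max_ans_len nums max_index_range index cnt ans
instance (goal : Int) (max_ans_len : Int) (nums : List Int) (max_index_range : Int) (index : Int) (cnt : Int) (ans : Int) (out : Int) : Decidable (Spec_go goal max_ans_len nums max_index_range index cnt ans out) := by unfold Spec_go; infer_instance

-- ===== CLAIM (what is proved, stated in full; the proofs are below) =====
def Claim_equal_go : Prop := ∀ (goal : Int) (max_ans_len : Int) (nums : List Int) (max_index_range : Int) (index : Int) (cnt : Int) (ans : Int), Dom_go goal max_ans_len nums max_index_range index cnt ans → Pre_go goal max_ans_len nums max_index_range index cnt ans → Spec_go goal max_ans_len nums max_index_range index cnt ans (go goal max_ans_len nums max_index_range index cnt ans)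

-- ===== LEMMAS AND PROOFS =====

-- Ncnt l c t = number of subsets of l of size c summing to t (the common spec of A and B)
def Ncnt : List Int → Int → Int → Int
  | [], c, t => if c = 0 ∧ t = 0 then 1 else 0
  | x :: r, c, t => if c = 0 then (if t = 0 then 1 else 0) else Ncnt r (c - 1) (t - x) + Ncnt r c t

lemma Ncnt_zero (l : List Int) (t : Int) : Ncnt l 0 t = if t = 0 then 1 else 0 := by
  cases l <;> simp [Ncnt]

lemma Ncnt_neg (l : List Int) : ∀ c t : Int, c < 0 → Ncnt l c t = 0 := by
  induction l with
  | nil => intro c t hc; simp [Ncnt]; omega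
  | cons x r ih =>
      intro c t hc
      simp only [Ncnt, if_neg (by omega : ¬ c = 0)]
      rw [ih _ _ (by omega), ih _ _ hc]
      ring

lemma Ncnt_snoc (l : List Int) : ∀ x c t : Int,
    Ncnt (l ++ [x]) c t = Ncnt l c t + Ncnt l (c - 1) (t - x) := by
  induction l with
  | nil =>
      intro x c t
      simp only [List.nil_append, Ncnt]
      split_ifs <;> omega
  | cons y r ih =>
      intro x c t
      simp only [List.cons_append, Ncnt]
      rw [ih, ih]
      have e : t - y - x = t - x - y := by ring
      rw [e]
      by_cases hc : c = 0
      · rw [if_pos hc, if_pos hc, if_neg (by omega : ¬ c - 1 = 0),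
            Ncnt_neg r (c - 1 - 1) (t - x - y) (by omega),
            Ncnt_neg r (c - 1) (t - x) (by omega)]
        ring
      · rw [if_neg hc, if_neg hc]
        by_cases hc1 : c = 1
        · subst hc1
          rw [if_pos (by norm_num : (1 : Int) - 1 = 0),
              Ncnt_neg r (1 - 1 - 1) (t - x - y) (by norm_num)]
          simp only [show (1 : Int) - 1 = 0 from by norm_num, Ncnt_zero]
          ring
        · rw [if_neg (by omega : ¬ c - 1 = 0)]
          ring

-- ===== A characterised by Ncnt =====
lemma go_eq_Ncnt (goal max_ans_len : Int) (nums : List Int) (max_index_range : Int) :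
    ∀ (n : Nat) (index cnt ans : Int), (max_index_range - index).toNat ≤ n →
    (∀ i : Int, index ≤ i → i < max_index_range → PySem.Raise.InRange nums.length i) →
    go goal max_ans_len nums max_index_range index cnt ans =
      Ncnt ((PySem.List.pyRange index max_index_range).map (fun i => PySem.List.pyGetD nums i 0))
        (max_ans_len - cnt) (goal - ans) := by
  intro n
  induction n with
  | zero =>
      intro index cnt ans hn _
      have hle : max_index_range ≤ index := by omega
      rw [go, PySem.List.pyRange_one_eq_nil hle]
      by_cases hc : cnt = max_ans_len
      · rw [if_pos hc]
        simp only [List.map_nil, Ncnt]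
        split_ifs <;> omega
      · rw [if_neg hc, if_pos hle]
        simp only [List.map_nil, Ncnt]
        split_ifs <;> omega
  | succ n ih =>
      intro index cnt ans hn H
      by_cases hc : cnt = max_ans_len
      · rw [go, if_pos hc, (by omega : max_ans_len - cnt = 0), Ncnt_zero]
        split_ifs <;> omega
      · by_cases hi : max_index_range ≤ index
        · rw [go, if_neg hc, if_pos hi, PySem.List.pyRange_one_eq_nil hi]
          simp only [List.map_nil, Ncnt]
          split_ifs <;> omega
        · have hlt : index < max_index_range := by omega
          have hin : PySem.Raise.InRange nums.length index := H index le_rfl hlt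
          obtain ⟨x, hx⟩ : ∃ x, PySem.List.pyGet? nums index = some x := by
            rcases h : PySem.List.pyGet? nums index with _ | x
            · exact absurd ((PySem.List.pyGet?_eq_none_iff nums index).mp h) (not_not_intro hin)
            · exact ⟨x, rfl⟩
          rw [go, if_neg hc, if_neg hi, hx]
          show go goal max_ans_len nums max_index_range (index + 1) (cnt + 1) (ans + x) +
              go goal max_ans_len nums max_index_range (index + 1) cnt ans = _
          have H' : ∀ i : Int, index + 1 ≤ i → i < max_index_range → PySem.Raise.InRange nums.length i :=
            fun i h1 h2 => H i (by omega) h2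
          rw [ih (index + 1) (cnt + 1) (ans + x) (by omega) H',
              ih (index + 1) cnt ans (by omega) H']
          rw [PySem.List.pyRange_one_cons hlt, List.map_cons]
          have hxd : PySem.List.pyGetD nums index 0 = x := by
            simp [PySem.List.pyGetD, hx]
          rw [hxd]
          simp only [Ncnt, if_neg (by omega : ¬ max_ans_len - cnt = 0)]
          have e1 : max_ans_len - (cnt + 1) = max_ans_len - cnt - 1 := by ring
          have e2 : goal - (ans + x) = goal - ans - x := by ring
          rw [e1, e2]

-- ===== B-side dictionary lemmas =====
lemma inner_getD (k x : Int) : ∀ (l : List ((Int × Int) × Int)) (d0 : PySem.Dict (Int × Int) Int) (q : Int × Int),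
    (l.foldl (fun nd p =>
        if p.1.1 < k then nd.insert (p.1.1 + 1, p.1.2 + x) (nd.getD (p.1.1 + 1, p.1.2 + x) 0 + p.2)
        else nd) d0).getD q 0
      = d0.getD q 0 +
        ((l.filter (fun p => decide (p.1.1 < k ∧ (p.1.1 + 1, p.1.2 + x) = q))).map (·.2)).sum := by
  intro l
  induction l with
  | nil => intro d0 q; simp
  | cons p rest ih =>
      intro d0 q
      by_cases h1 : p.1.1 < k
      · by_cases h2 : (p.1.1 + 1, p.1.2 + x) = q
        · rw [List.foldl_cons, if_pos h1, ih,
              List.filter_cons_of_pos (by simp [h1, h2]),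
              List.map_cons, List.sum_cons,
              PySem.Dict.getD_insert, if_pos h2.symm, ← h2]
          ring
        · rw [List.foldl_cons, if_pos h1, ih,
              List.filter_cons_of_neg (by simp [h2]),
              PySem.Dict.getD_insert, if_neg (fun hq => h2 hq.symm)]
      · rw [List.foldl_cons, if_neg h1, ih, List.filter_cons_of_neg (by simp [h1])]

lemma inner_nodup (k x : Int) : ∀ (l : List ((Int × Int) × Int)) (d0 : PySem.Dict (Int × Int) Int),
    d0.keys.Nodup →
    (l.foldl (fun nd p =>
        if p.1.1 < k then nd.insert (p.1.1 + 1, p.1.2 + x) (nd.getD (p.1.1 + 1, p.1.2 + x) 0 + p.2)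
        else nd) d0).keys.Nodup := by
  intro l
  induction l with
  | nil => intro d0 h; simpa using h
  | cons p rest ih =>
      intro d0 h
      simp only [List.foldl_cons]
      by_cases h1 : p.1.1 < k
      · rw [if_pos h1]; exact ih _ (PySem.Dict.nodup_keys_insert _ _ _ h)
      · rw [if_neg h1]; exact ih _ h

lemma sum_filter_key (q : Int × Int) : ∀ (l : List ((Int × Int) × Int)),
    (PySem.Dict.mk l).keys.Nodup →
    ((l.filter (fun p => decide (p.1 = q))).map (·.2)).sum = (PySem.Dict.mk l).getD q 0 := by
  intro l
  induction l with
  | nil => intro _; simp [PySem.Dict.getD, PySem.Dict.get?]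
  | cons p rest ih =>
      intro hnd
      rw [PySem.Dict.keys_mk] at hnd
      simp only [List.map_cons, List.nodup_cons] at hnd
      obtain ⟨hnotin, hnd'⟩ := hnd
      rw [List.filter_cons]
      by_cases h : p.1 = q
      · rw [if_pos (by simp [h])]
        have hrest : rest.filter (fun p => decide (p.1 = q)) = [] := by
          rw [List.filter_eq_nil_iff]
          intro r hr hrq
          exact hnotin (List.mem_map.mpr ⟨r, hr, ((by simpa using hrq : r.1 = q).trans h.symm)⟩)
        rw [hrest]
        simp only [List.map_cons, List.map_nil, List.sum_cons, List.sum_nil]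
        have : (PySem.Dict.mk (p :: rest)).getD q 0 = p.2 := by
          have : (PySem.Dict.mk (p :: rest)).get? q = some p.2 := by
            have := PySem.Dict.get?_mk_cons p.1 p.2 rest q
            rw [this, if_pos (by simp [h])]
          simp [PySem.Dict.getD, this]
        rw [this]; ring
      · rw [if_neg (by simp [h])]
        have : (PySem.Dict.mk (p :: rest)).getD q 0 = (PySem.Dict.mk rest).getD q 0 := by
          simp only [PySem.Dict.getD]
          rw [PySem.Dict.get?_mk_cons, if_neg (by simp [h])]
        rw [this]
        exact ih (by rw [PySem.Dict.keys_mk]; exact hnd')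

lemma getD_eq_sum_filter (d : PySem.Dict (Int × Int) Int) (q : Int × Int) (hnd : d.keys.Nodup) :
    ((d.items.filter (fun p => decide (p.1 = q))).map (·.2)).sum = d.getD q 0 := by
  obtain ⟨l⟩ := d
  exact sum_filter_key q l hnd

lemma goStep_getD (k x : Int) (d : PySem.Dict (Int × Int) Int) (hnd : d.keys.Nodup) (q : Int × Int) :
    (goStep k x d).getD q 0 =
      d.getD q 0 + (if q.1 ≤ k then d.getD (q.1 - 1, q.2 - x) 0 else 0) := by
  unfold goStep
  rw [inner_getD]
  congr 1
  by_cases hq : q.1 ≤ k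
  · rw [if_pos hq]
    have hcong : d.items.filter (fun p => decide (p.1.1 < k ∧ (p.1.1 + 1, p.1.2 + x) = q))
        = d.items.filter (fun p => decide (p.1 = (q.1 - 1, q.2 - x))) := by
      apply List.filter_congr
      intro p _
      simp only [decide_eq_decide]
      constructor
      · rintro ⟨h1, h2⟩
        have := congrArg Prod.fst h2
        have := congrArg Prod.snd h2
        apply Prod.ext <;> simp_all <;> omega
      · intro h
        have h1 : p.1.1 = q.1 - 1 := by rw [h]
        have h2 : p.1.2 = q.2 - x := by rw [h]
        refine ⟨by omega, ?_⟩
        apply Prod.ext <;> simp [h1, h2]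
    rw [hcong, getD_eq_sum_filter d _ hnd]
  · rw [if_neg hq]
    have : d.items.filter (fun p => decide (p.1.1 < k ∧ (p.1.1 + 1, p.1.2 + x) = q)) = [] := by
      rw [List.filter_eq_nil_iff]
      intro p _ hp
      simp only [decide_eq_true_eq] at hp
      obtain ⟨h1, h2⟩ := hp
      have := congrArg Prod.fst h2
      simp at this
      omega
    rw [this]; simp

lemma goStep_nodup (k x : Int) (d : PySem.Dict (Int × Int) Int) (hnd : d.keys.Nodup) :
    (goStep k x d).keys.Nodup := inner_nodup k x d.items d hnd

-- invariant through B's outer loop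
lemma outer_inv (nums : List Int) (k : Int) :
    ∀ (is : List Int) (d : PySem.Dict (Int × Int) Int) (l : List Int),
    d.keys.Nodup →
    (∀ i ∈ is, PySem.Raise.InRange nums.length i) →
    (∀ c s : Int, d.getD (c, s) 0 = if c ≤ k then Ncnt l c s else 0) →
    (is.foldl (fun d i =>
        match PySem.List.pyGet? nums i with
        | none => d
        | some x => goStep k x d) d).keys.Nodup ∧
    (∀ c s : Int, (is.foldl (fun d i =>
        match PySem.List.pyGet? nums i with
        | none => d
        | some x => goStep k x d) d).getD (c, s) 0 =
      if c ≤ k then Ncnt (l ++ is.map (fun i => PySem.List.pyGetD nums i 0)) c s else 0) := by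
  intro is
  induction is with
  | nil => intro d l hnd _ hinv; simpa using ⟨hnd, hinv⟩
  | cons i rest ih =>
      intro d l hnd hvalid hinv
      have hin : PySem.Raise.InRange nums.length i := hvalid i (by simp)
      obtain ⟨x, hx⟩ : ∃ x, PySem.List.pyGet? nums i = some x := by
        rcases h : PySem.List.pyGet? nums i with _ | x
        · exact absurd ((PySem.List.pyGet?_eq_none_iff nums i).mp h) (not_not_intro hin)
        · exact ⟨x, rfl⟩
      simp only [List.foldl_cons, hx]
      have hxd : PySem.List.pyGetD nums i 0 = x := by simp [PySem.List.pyGetD, hx]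
      have hstep : ∀ c s : Int, (goStep k x d).getD (c, s) 0 =
          if c ≤ k then Ncnt (l ++ [x]) c s else 0 := by
        intro c s
        rw [goStep_getD k x d hnd (c, s)]
        simp only
        rw [hinv c s, hinv (c - 1) (s - x), Ncnt_snoc]
        by_cases hck : c ≤ k
        · rw [if_pos hck, if_pos hck, if_pos (by omega : c - 1 ≤ k), if_pos hck]
        · rw [if_neg hck, if_neg hck, if_neg hck]; ring
      have := ih (goStep k x d) (l ++ [x]) (goStep_nodup k x d hnd)
        (fun j hj => hvalid j (by simp [hj])) hstep
      refine ⟨this.1, fun c s => ?_⟩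
      rw [this.2 c s]
      simp [hxd, List.append_assoc]

-- B characterised by Ncnt (in the DP branch, k ≥ 1)
lemma go_alt_eq_Ncnt (goal max_ans_len : Int) (nums : List Int) (max_index_range index cnt ans : Int)
    (hk : 1 ≤ max_ans_len - cnt)
    (H : ∀ i : Int, index ≤ i → i < max_index_range → PySem.Raise.InRange nums.length i) :
    go_alt goal max_ans_len nums max_index_range index cnt ans =
      Ncnt ((PySem.List.pyRange index max_index_range).map (fun i => PySem.List.pyGetD nums i 0))
        (max_ans_len - cnt) (goal - ans) := by
  simp only [go_alt]
  rw [if_neg (by omega : ¬ max_ans_len - cnt = 0), if_neg (by omega : ¬ max_ans_len - cnt < 0)]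
  set k := max_ans_len - cnt with hkdef
  set target := goal - ans with htdef
  have hnd0 : ((PySem.Dict.empty).insert ((0 : Int), (0 : Int)) (1 : Int)).keys.Nodup :=
    PySem.Dict.nodup_keys_insert _ _ _ PySem.Dict.nodup_keys_empty
  have hinv0 : ∀ c s : Int, ((PySem.Dict.empty).insert ((0 : Int), (0 : Int)) (1 : Int)).getD (c, s) 0 =
      if c ≤ k then Ncnt ([] : List Int) c s else 0 := by
    intro c s
    rw [PySem.Dict.getD_insert]
    by_cases h : (c, s) = ((0 : Int), (0 : Int))
    · have hc : c = 0 := congrArg Prod.fst h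
      have hs : s = 0 := congrArg Prod.snd h
      rw [if_pos h, if_pos (by omega : c ≤ k)]
      simp [Ncnt, hc, hs]
    · rw [if_neg h, PySem.Dict.getD_empty]
      by_cases hck : c ≤ k
      · rw [if_pos hck]
        simp only [Ncnt]
        rw [if_neg (fun ⟨hc, hs⟩ => h (by simp [hc, hs]))]
      · rw [if_neg hck]
  have hvalid : ∀ i ∈ PySem.List.pyRange index max_index_range, PySem.Raise.InRange nums.length i := by
    intro i hi
    rw [PySem.List.mem_pyRange_one] at hi
    exact H i hi.1 hi.2
  obtain ⟨hndF, hinvF⟩ := outer_inv nums k (PySem.List.pyRange index max_index_range)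
    ((PySem.Dict.empty).insert ((0 : Int), (0 : Int)) (1 : Int)) [] hnd0 hvalid hinv0
  set F := (PySem.List.pyRange index max_index_range).foldl
      (fun d i =>
        match PySem.List.pyGet? nums i with
        | none => d
        | some x => goStep k x d)
      ((PySem.Dict.empty).insert ((0 : Int), (0 : Int)) (1 : Int)) with hF
  have hcond : F.items.foldl (fun acc p => if p.1.1 = k ∧ p.1.2 = target then acc + p.2 else acc) 0
      = F.items.foldl (fun acc p => if p.1 = ((k, target) : Int × Int) then acc + p.2 else acc) 0 := by
    apply PySem.List.foldl_congr_mem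
    intro acc p _
    by_cases h : p.1 = ((k, target) : Int × Int)
    · rw [if_pos h, if_pos ⟨congrArg Prod.fst h, congrArg Prod.snd h⟩]
    · rw [if_neg h, if_neg (fun ⟨h1, h2⟩ => h (Prod.ext h1 h2))]
  rw [hcond, PySem.List.foldl_ite_eq_foldl_filter (fun p : (Int × Int) × Int => p.1 = ((k, target) : Int × Int)) (fun acc p => acc + p.2),
      PySem.List.foldl_add, getD_eq_sum_filter F (k, target) hndF]
  rw [hinvF k target, if_pos le_rfl]
  simp

-- ===== VERDICT (by name: the statement is the Claim_ definition above) =====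
theorem go_spec : Claim_equal_go := by
  intro goal max_ans_len nums max_index_range index cnt ans _ hpre
  unfold Spec_go
  by_cases hc : cnt = max_ans_len
  · subst hc
    rw [go, if_pos rfl]
    unfold go_alt
    simp
  · have H : ∀ i : Int, index ≤ i → i < max_index_range → PySem.Raise.InRange nums.length i := by
      rcases hpre with h | h | h
      · exact absurd h hc
      · intro i h1 h2; omega
      · intro i h1 h2
        exact ⟨by omega, by omega⟩
    by_cases hk : max_ans_len - cnt < 0
    · rw [go_eq_Ncnt goal max_ans_len nums max_index_range (max_index_range - index).toNat
          index cnt ans le_rfl H]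
      rw [Ncnt_neg _ _ _ hk]
      unfold go_alt
      rw [if_neg (by omega : ¬ max_ans_len - cnt = 0), if_pos hk]
    · rw [go_eq_Ncnt goal max_ans_len nums max_index_range (max_index_range - index).toNat
          index cnt ans le_rfl H,
          go_alt_eq_Ncnt goal max_ans_len nums max_index_range index cnt ans (by omega) H]
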